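-- pv_equiv track=rewrite | github.com/matteobarbera/AdventOfCode2020 | Day17/day17_solutions.py | hypercube_will_activate
-- ===== SOURCE A (Python) =====
-- from itertools import product
--
-- def hypercube_will_activate(active_cubes: set, cube: tuple):
--     x, y, z, w = cube
--     active_neighbors = 0
--     for c in product(*[range(x - 1, x + 2), range(y - 1, y + 2), range(z - 1, z + 2), range(w - 1, w + 2)]):
--         if active_neighbors > 3:
--             return False
--         if c in active_cubes:
--             active_neighbors += 1
--     else:
--         if active_neighbors == 3:
--             return True
--     return False
-- ===== SOURCE B (Python) =====
-- def hypercube_will_activate(active_cubes: set, cube: tuple):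
--     x, y, z, w = cube
--     count = 0
--     for ax, ay, az, aw in active_cubes:
--         if abs(ax - x) <= 1 and abs(ay - y) <= 1 and abs(az - z) <= 1 and abs(aw - w) <= 1:
--             count += 1
--     return count == 3
-- ===== Notes on version B (the rewrite author's own statement) =====
-- stated objective: alternative
-- what changed: B iterates over the active set counting cubes within Chebyshev distance 1 of the target and compares the final count to 3, instead of enumerating the 81 neighbor offsets with per-offset set lookups and an early-exit counter.
import Mathlib
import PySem

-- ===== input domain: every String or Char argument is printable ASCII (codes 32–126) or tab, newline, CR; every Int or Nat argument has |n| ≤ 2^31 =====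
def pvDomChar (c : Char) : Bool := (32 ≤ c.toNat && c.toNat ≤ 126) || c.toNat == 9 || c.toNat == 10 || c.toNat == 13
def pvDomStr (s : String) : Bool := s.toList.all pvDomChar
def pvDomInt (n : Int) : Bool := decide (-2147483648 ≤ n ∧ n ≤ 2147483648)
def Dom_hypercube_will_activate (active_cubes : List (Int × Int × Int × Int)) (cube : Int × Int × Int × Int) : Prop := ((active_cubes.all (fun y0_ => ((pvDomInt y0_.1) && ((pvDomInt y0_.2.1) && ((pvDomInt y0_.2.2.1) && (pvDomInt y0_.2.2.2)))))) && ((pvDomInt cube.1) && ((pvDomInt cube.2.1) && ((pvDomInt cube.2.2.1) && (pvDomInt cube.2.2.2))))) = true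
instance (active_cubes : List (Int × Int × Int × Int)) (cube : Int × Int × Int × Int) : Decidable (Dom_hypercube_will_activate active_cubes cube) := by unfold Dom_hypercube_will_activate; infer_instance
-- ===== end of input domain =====

-- B counts active cubes within Chebyshev distance 1 of the target and compares to 3,
-- instead of A's 81 neighbor-offset set lookups with an early-exit counter (objective: alternative).

-- ===== PORT A =====
-- itertools.product of the four 3-element ranges, ported as Mathlib's list product ×ˢ
def pvNeighbors (x y z w : Int) : List (Int × Int × Int × Int) :=
  PySem.List.pyRange (x - 1) (x + 2) 1 ×ˢ
    (PySem.List.pyRange (y - 1) (y + 2) 1 ×ˢ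
      (PySem.List.pyRange (z - 1) (z + 2) 1 ×ˢ PySem.List.pyRange (w - 1) (w + 2) 1))

-- the for-loop with its early `return False` and the final `active_neighbors == 3` check
def pvLoopA (active : List (Int × Int × Int × Int)) :
    List (Int × Int × Int × Int) → Int → Bool
  | [], n => decide (n = 3)
  | c :: rest, n =>
    if n > 3 then false
    else pvLoopA active rest (if c ∈ active then n + 1 else n)

def hypercube_will_activate (active_cubes : List (Int × Int × Int × Int)) (cube : Int × Int × Int × Int) : Bool :=
  pvLoopA active_cubes (pvNeighbors cube.1 cube.2.1 cube.2.2.1 cube.2.2.2) 0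

-- ===== PORT B =====
def hypercube_will_activate_alt (active_cubes : List (Int × Int × Int × Int)) (cube : Int × Int × Int × Int) : Bool :=
  let count : Int := active_cubes.foldl
    (fun cnt a =>
      if |a.1 - cube.1| ≤ 1 ∧ |a.2.1 - cube.2.1| ≤ 1 ∧ |a.2.2.1 - cube.2.2.1| ≤ 1 ∧ |a.2.2.2 - cube.2.2.2| ≤ 1
      then cnt + 1 else cnt) 0
  decide (count = 3)

-- ===== PRECONDITION & SPEC =====
-- active_cubes is a Python set, encoded as the list of its DISTINCT elements; a list with
-- duplicates encodes no Python input of A, so Pre_ requires Nodup (it excludes no input A runs on).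
def Pre_hypercube_will_activate (active_cubes : List (Int × Int × Int × Int)) (cube : Int × Int × Int × Int) : Prop :=
  active_cubes.Nodup

instance (active_cubes : List (Int × Int × Int × Int)) (cube : Int × Int × Int × Int) : Decidable (Pre_hypercube_will_activate active_cubes cube) := by unfold Pre_hypercube_will_activate; infer_instance

def pvWitness_hypercube_will_activate : (List (Int × Int × Int × Int)) × (Int × Int × Int × Int) :=
  ([(0, 0, 0, 0), (1, 0, 0, 0), (0, 1, 0, 0)], (0, 0, 0, 0))

def Spec_hypercube_will_activate (active_cubes : List (Int × Int × Int × Int)) (cube : Int × Int × Int × Int) (out : Bool) : Prop := out = hypercube_will_activate_alt active_cubes cube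
instance (active_cubes : List (Int × Int × Int × Int)) (cube : Int × Int × Int × Int) (out : Bool) : Decidable (Spec_hypercube_will_activate active_cubes cube out) := by unfold Spec_hypercube_will_activate; infer_instance

-- ===== CLAIM (what is proved, stated in full; the proofs are below) =====
def Claim_equal_hypercube_will_activate : Prop := ∀ (active_cubes : List (Int × Int × Int × Int)) (cube : Int × Int × Int × Int), Dom_hypercube_will_activate active_cubes cube → Pre_hypercube_will_activate active_cubes cube → Spec_hypercube_will_activate active_cubes cube (hypercube_will_activate active_cubes cube)

-- ===== LEMMAS AND PROOFS =====

-- A's loop equals "final count = 3" (the early exit at > 3 is harmless: the counter is monotone)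
theorem pvLoopA_eq (active : List (Int × Int × Int × Int)) :
    ∀ (cs : List (Int × Int × Int × Int)) (n : Int), 0 ≤ n →
      pvLoopA active cs n = decide (n + (cs.countP (fun c => decide (c ∈ active)) : Int) = 3) := by
  intro cs
  induction cs with
  | nil => intro n _; simp [pvLoopA]
  | cons c rest ih =>
    intro n hn
    simp only [pvLoopA, List.countP_cons]
    by_cases h4 : n > 3
    · have hc : (0 : Int) ≤ (rest.countP (fun c => decide (c ∈ active)) : Int) := by positivity
      simp only [h4, if_pos]
      by_cases hm : c ∈ active <;> simp [hm] <;> omega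
    · simp only [h4, if_neg, if_false]
      by_cases hm : c ∈ active
      · rw [if_pos hm, ih (n + 1) (by omega)]
        simp [hm]
        omega
      · rw [if_neg hm, ih n hn]
        simp [hm]
  termination_by cs => cs.length

-- B's foldl is a countP
theorem pvFoldl_count {α : Type} (p : α → Prop) [DecidablePred p] :
    ∀ (l : List α) (n : Int),
      l.foldl (fun cnt a => if p a then cnt + 1 else cnt) n
        = n + (l.countP (fun a => decide (p a)) : Int) := by
  intro l
  induction l with
  | nil => intro n; simp
  | cons a rest ih =>
    intro n
    simp only [List.foldl_cons, List.countP_cons]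
    by_cases h : p a <;> simp [h, ih] <;> omega

-- membership in the 81-cell neighbor block is the Chebyshev-distance-1 test
theorem mem_pvNeighbors (x y z w a b c d : Int) :
    (a, b, c, d) ∈ pvNeighbors x y z w ↔
      (|a - x| ≤ 1 ∧ |b - y| ≤ 1 ∧ |c - z| ≤ 1 ∧ |d - w| ≤ 1) := by
  simp only [pvNeighbors, SProd.sprod, List.pair_mem_product, PySem.List.mem_pyRange_one, abs_le]
  omega

theorem nodup_pvNeighbors (x y z w : Int) : (pvNeighbors x y z w).Nodup :=
  List.Nodup.product (PySem.List.nodup_pyRange_one _ _)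
    (List.Nodup.product (PySem.List.nodup_pyRange_one _ _)
      (List.Nodup.product (PySem.List.nodup_pyRange_one _ _) (PySem.List.nodup_pyRange_one _ _)))

-- symmetric intersection count for two duplicate-free lists
theorem countP_mem_comm {α : Type} [DecidableEq α] (l1 l2 : List α)
    (h1 : l1.Nodup) (h2 : l2.Nodup) :
    l1.countP (fun x => decide (x ∈ l2)) = l2.countP (fun x => decide (x ∈ l1)) := by
  have key : ∀ (a b : List α), a.Nodup →
      a.countP (fun x => decide (x ∈ b)) = (a.toFinset ∩ b.toFinset).card := by
    intro a b ha
    rw [List.countP_eq_length_filter, ← List.toFinset_card_of_nodup (ha.filter _),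
      List.toFinset_filter]
    congr 1
    ext x
    simp
  rw [key l1 l2 h1, key l2 l1 h2, Finset.inter_comm]

-- ===== VERDICT (by name: the statement is the Claim_ definition above) =====
theorem hypercube_will_activate_spec : Claim_equal_hypercube_will_activate := by
  intro active cube _ hpre
  obtain ⟨x, y, z, w⟩ := cube
  unfold Spec_hypercube_will_activate hypercube_will_activate hypercube_will_activate_alt
  rw [pvLoopA_eq active _ 0 le_rfl,
    pvFoldl_count (fun a : Int × Int × Int × Int =>
      |a.1 - x| ≤ 1 ∧ |a.2.1 - y| ≤ 1 ∧ |a.2.2.1 - z| ≤ 1 ∧ |a.2.2.2 - w| ≤ 1)]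
  have hcount :
      (pvNeighbors x y z w).countP (fun c => decide (c ∈ active))
        = active.countP (fun a : Int × Int × Int × Int =>
            decide (|a.1 - x| ≤ 1 ∧ |a.2.1 - y| ≤ 1 ∧ |a.2.2.1 - z| ≤ 1 ∧ |a.2.2.2 - w| ≤ 1)) := by
    have hcc := countP_mem_comm (pvNeighbors x y z w) active (nodup_pvNeighbors x y z w) hpre
    refine (List.countP_congr fun a _ => by simp).trans (hcc.trans (List.countP_congr fun a _ => ?_))
    obtain ⟨a1, a2, a3, a4⟩ := a
    simp [mem_pvNeighbors]
  rw [hcount]
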